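-- pv_equiv track=rewrite | github.com/JiangShaoYin/extract_cpp_project | extractor.py | align_str_in_bracket
-- ===== SOURCE A (Python) =====
-- def align_str_in_bracket(content):
--     if not content.startswith("("):
--         return content
--
--     right_bracket_pos = content.find(")")
--
--     sub_str = content[:right_bracket_pos + 1]
--     sub_str = sub_str.replace('\n', '')
--
--     items = sub_str.split(" ")
--     result = [item for item in items if item != '']
--
--     return " ".join(result) + content[right_bracket_pos + 1:]
-- ===== SOURCE B (Python) =====
-- def align_str_in_bracket(content):
--     if not content.startswith("("):
--         return content
--
--     right_bracket_pos = content.find(")")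
--
--     out = []
--     pending = False
--     for ch in content[:right_bracket_pos + 1]:
--         if ch == '\n':
--             continue
--         if ch == ' ':
--             pending = True
--             continue
--         if pending and out:
--             out.append(' ')
--         out.append(ch)
--         pending = False
--
--     return ''.join(out) + content[right_bracket_pos + 1:]
-- ===== Notes on version B (the rewrite author's own statement) =====
-- stated objective: alternative
-- what changed: Replaced A's newline-removal + space-split + empty-filter + join pipeline (four passes building intermediate lists) by one explicit scan over the bracketed prefix with an output buffer and a pending-space flag.
import Mathlib
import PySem

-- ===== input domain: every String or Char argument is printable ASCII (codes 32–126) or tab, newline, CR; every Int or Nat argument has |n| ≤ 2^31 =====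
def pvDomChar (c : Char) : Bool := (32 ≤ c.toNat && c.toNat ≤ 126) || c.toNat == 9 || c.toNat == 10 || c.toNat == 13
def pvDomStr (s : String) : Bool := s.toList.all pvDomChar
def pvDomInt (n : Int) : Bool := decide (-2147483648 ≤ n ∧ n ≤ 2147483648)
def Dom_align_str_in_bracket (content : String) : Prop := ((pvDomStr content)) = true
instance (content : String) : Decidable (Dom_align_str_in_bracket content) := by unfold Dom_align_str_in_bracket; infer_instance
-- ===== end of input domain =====

-- B replaces A's replace/split/filter/join pipeline by a single scan with a pending-space flag (same return value; objective: alternative decomposition).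

-- ===== PORT A =====
def align_str_in_bracket (content : String) : String :=
  if !(PySem.Chars.startswith content.toList ['(']) then content
  else
    let cs := content.toList
    let right_bracket_pos : Int := PySem.Chars.find cs [')']
    let sub_str := PySem.List.slice cs none (some (right_bracket_pos + 1))
    let sub_str2 := PySem.Chars.replace sub_str ['\n'] []
    let items := PySem.Chars.splitOn sub_str2 [' ']
    let result := items.filter (fun item => item ≠ [])
    String.ofList (PySem.Chars.join [' '] result ++ PySem.List.slice cs (some (right_bracket_pos + 1)) none)

-- ===== PORT B =====
-- the explicit pass of Source B: skip '\n', remember a pending space, emit one ' ' before a char only if already nonempty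
def pvScan : List Char → List Char → Bool → List Char
  | [], out, _ => out
  | c :: rest, out, pending =>
    if c = '\n' then pvScan rest out pending
    else if c = ' ' then pvScan rest out true
    else pvScan rest ((if pending ∧ out ≠ [] then out ++ [' '] else out) ++ [c]) false

def align_str_in_bracket_alt (content : String) : String :=
  if !(PySem.Chars.startswith content.toList ['(']) then content
  else
    let cs := content.toList
    let right_bracket_pos : Int := PySem.Chars.find cs [')']
    String.ofList (pvScan (PySem.List.slice cs none (some (right_bracket_pos + 1))) [] false
               ++ PySem.List.slice cs (some (right_bracket_pos + 1)) none)

-- ===== PRECONDITION & SPEC =====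
def Spec_align_str_in_bracket (content : String) (out : String) : Prop := out = align_str_in_bracket_alt content
instance (content : String) (out : String) : Decidable (Spec_align_str_in_bracket content out) := by unfold Spec_align_str_in_bracket; infer_instance

-- ===== CLAIM (what is proved, stated in full; the proofs are below) =====
def Claim_equal_align_str_in_bracket : Prop := ∀ (content : String), Dom_align_str_in_bracket content → Spec_align_str_in_bracket content (align_str_in_bracket content)

-- ===== LEMMAS AND PROOFS =====

-- structural version of sub.split(" "): (first piece, remaining pieces)
def pvSp : List Char → List Char × List (List Char)
  | [] => ([], [])
  | c :: t =>
    let p := pvSp t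
    if c = ' ' then ([], p.1 :: p.2) else (c :: p.1, p.2)

-- the normalized value both ports compute on the bracketed part (after '\n' removal)
def pvW (cs : List Char) : List Char :=
  PySem.Chars.join [' '] (((pvSp cs).1 :: (pvSp cs).2).filter (fun item => item ≠ []))

theorem pv_join_cons (x : List Char) (l : List (List Char)) :
    PySem.Chars.join [' '] (x :: l)
      = x ++ (if l = [] then [] else ' ' :: PySem.Chars.join [' '] l) := by
  cases l with
  | nil => simp [PySem.Chars.join, List.intercalate]
  | cons y r => simp [PySem.Chars.join, List.intercalate, List.intersperse]

theorem pv_join_ne_nil (l : List (List Char)) (h : ∀ x ∈ l, x ≠ []) :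
    (PySem.Chars.join [' '] l = [] ↔ l = []) := by
  cases l with
  | nil => simp [PySem.Chars.join, List.intercalate]
  | cons x r =>
    rw [pv_join_cons]
    constructor
    · intro he
      have hx : x ≠ [] := h x (by simp)
      cases x with
      | nil => exact absurd rfl hx
      | cons a b => simp at he
    · intro he; cases he

theorem pv_replace_go (l : List Char) : ∀ (fuel : Nat) (acc : List Char), l.length ≤ fuel →
    PySem.Chars.replace.go ['\n'] [] fuel l acc = acc.reverse ++ l.filter (fun c => c ≠ '\n') := by
  induction l with
  | nil => intro fuel acc _; cases fuel <;> simp [PySem.Chars.replace.go]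
  | cons c t ih =>
    intro fuel acc hf
    cases fuel with
    | zero => simp at hf
    | succ f =>
      by_cases hc : c = '\n'
      · subst hc
        have hp : (['\n'] : List Char).isPrefixOf ('\n' :: t) = true := by simp [List.isPrefixOf]
        simp only [PySem.Chars.replace.go, hp, if_pos]
        rw [show List.drop (['\n'] : List Char).length ('\n' :: t) = t from rfl,
            show (([] : List Char).reverse ++ acc) = acc from rfl]
        rw [ih f acc (by simpa using Nat.le_of_succ_le_succ hf)]
        simp
      · have hp : (['\n'] : List Char).isPrefixOf (c :: t) = false := by
          simp [List.isPrefixOf]; intro h; exact hc h.symm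
        simp only [PySem.Chars.replace.go, hp]
        rw [ih f (c :: acc) (by simpa using Nat.le_of_succ_le_succ hf)]
        simp [hc]

theorem pv_replace (l : List Char) :
    PySem.Chars.replace l ['\n'] [] = l.filter (fun c => c ≠ '\n') := by
  simp only [PySem.Chars.replace, List.isEmpty]
  exact pv_replace_go l l.length [] le_rfl

theorem pv_split_go (l : List Char) : ∀ (fuel : Nat) (cur : List Char) (acc : List (List Char)),
    l.length ≤ fuel →
    PySem.Chars.splitOn.go [' '] fuel l cur acc
      = acc.reverse ++ (cur.reverse ++ (pvSp l).1) :: (pvSp l).2 := by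
  induction l with
  | nil => intro fuel cur acc _; cases fuel <;> simp [PySem.Chars.splitOn.go, pvSp]
  | cons c t ih =>
    intro fuel cur acc hf
    cases fuel with
    | zero => simp at hf
    | succ f =>
      by_cases hc : c = ' '
      · subst hc
        have hp : ([' '] : List Char).isPrefixOf (' ' :: t) = true := by simp [List.isPrefixOf]
        simp only [PySem.Chars.splitOn.go, hp, if_pos]
        rw [show List.drop ([' '] : List Char).length (' ' :: t) = t from rfl]
        rw [ih f [] (cur.reverse :: acc) (by simpa using Nat.le_of_succ_le_succ hf)]
        simp [pvSp]
      · have hp : ([' '] : List Char).isPrefixOf (c :: t) = false := by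
          simp [List.isPrefixOf]; intro h; exact hc h.symm
        simp only [PySem.Chars.splitOn.go, hp]
        rw [ih f (c :: cur) acc (by simpa using Nat.le_of_succ_le_succ hf)]
        simp [pvSp, hc]

theorem pv_split (l : List Char) :
    PySem.Chars.splitOn l [' '] = (pvSp l).1 :: (pvSp l).2 := by
  simp only [PySem.Chars.splitOn]
  rw [pv_split_go l (l.length + 1) [] [] (by omega)]
  simp

-- scan2: pvScan on a newline-free list (the '\n' branch never fires)
def pvScan2 : List Char → List Char → Bool → List Char
  | [], out, _ => out
  | c :: rest, out, pending =>
    if c = ' ' then pvScan2 rest out true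
    else pvScan2 rest ((if pending ∧ out ≠ [] then out ++ [' '] else out) ++ [c]) false

theorem pvScan_eq_scan2 (cs : List Char) : ∀ (out : List Char) (p : Bool),
    pvScan cs out p = pvScan2 (cs.filter (fun c => c ≠ '\n')) out p := by
  induction cs with
  | nil => intro out p; simp [pvScan, pvScan2]
  | cons c t ih =>
    intro out p
    by_cases hc : c = '\n'
    · subst hc; simp [pvScan, ih]
    · by_cases hs : c = ' '
      · subst hs; simp [pvScan, pvScan2, ih]
      · simp [pvScan, pvScan2, hc, hs, ih]

theorem pv_W_nil : pvW [] = [] := by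
  simp [pvW, pvSp, PySem.Chars.join, List.intercalate]

theorem pv_W_cons_space (rest : List Char) : pvW (' ' :: rest) = pvW rest := by
  simp [pvW, pvSp]

theorem pv_W_cons (c : Char) (rest : List Char) (hc : c ≠ ' ') :
    pvW (c :: rest)
      = c :: (if rest.head? = some ' ' ∧ pvW rest ≠ [] then ' ' :: pvW rest else pvW rest) := by
  have hfil : ∀ x ∈ ((pvSp rest).2.filter (fun item => item ≠ [])), x ≠ [] := by
    intro x hx
    simpa using (List.mem_filter.mp hx).2
  have hj := pv_join_ne_nil _ hfil
  have hL : pvW (c :: rest)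
      = c :: ((pvSp rest).1
        ++ (if (pvSp rest).2.filter (fun item => item ≠ []) = [] then []
            else ' ' :: PySem.Chars.join [' '] ((pvSp rest).2.filter (fun item => item ≠ [])))) := by
    simp only [pvW, pvSp, hc]
    rw [List.filter_cons_of_pos (by simp), pv_join_cons]
    simp
  rw [hL]
  cases rest with
  | nil =>
    simp [pvW, pvSp, PySem.Chars.join, List.intercalate]
  | cons d t =>
    by_cases hd : d = ' '
    · subst hd
      have h2 : pvW (' ' :: t) = PySem.Chars.join [' '] ((pvSp (' ' :: t)).2.filter (fun item => item ≠ [])) := by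
        simp [pvW, pvSp]
      by_cases hr : (pvSp (' ' :: t)).2.filter (fun item => item ≠ []) = []
      · have hWnil : pvW (' ' :: t) = [] := by rw [h2, hj.mpr hr]
        rw [if_pos hr, if_neg (fun hcon => hcon.2 hWnil)]
        rw [hWnil]
        simp [pvSp]
      · have hWne : pvW (' ' :: t) ≠ [] := by rw [h2]; exact fun he => hr (hj.mp he)
        rw [if_neg hr,
            if_pos (show (' ' :: t).head? = some ' ' ∧ pvW (' ' :: t) ≠ [] from ⟨rfl, hWne⟩)]
        rw [h2]
        simp [pvSp]
    · have h1 : (pvSp (d :: t)).1 = d :: (pvSp t).1 := by simp [pvSp, hd]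
      have hW : pvW (d :: t)
          = (d :: (pvSp t).1)
            ++ (if (pvSp (d :: t)).2.filter (fun item => item ≠ []) = [] then []
                else ' ' :: PySem.Chars.join [' '] ((pvSp (d :: t)).2.filter (fun item => item ≠ []))) := by
        simp only [pvW, pvSp, hd]
        rw [List.filter_cons_of_pos (by simp), pv_join_cons]
        simp
      have hcond : ¬((d :: t).head? = some ' ' ∧ pvW (d :: t) ≠ []) := by
        intro hcon
        have : d = ' ' := by simpa using hcon.1
        exact hd this
      rw [if_neg hcond, hW, h1, List.cons_append]
theorem pv_scan2_spec (cs : List Char) : ∀ (out : List Char) (p : Bool),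
    pvScan2 cs out p
      = out ++ (if out ≠ [] ∧ (p = true ∨ cs.head? = some ' ') ∧ pvW cs ≠ []
                then ' ' :: pvW cs else pvW cs) := by
  induction cs with
  | nil => intro out p; simp [pvScan2, pv_W_nil]
  | cons c t ih =>
    intro out p
    by_cases hc : c = ' '
    · subst hc
      simp only [pvScan2, if_true]
      rw [ih out true, pv_W_cons_space]
      by_cases ho : out = [] <;> by_cases hw : pvW t = [] <;> simp [ho, hw]
    · simp only [pvScan2, if_neg hc]
      rw [ih _ false]
      rw [pv_W_cons c t hc]
      by_cases hp : p = true <;> by_cases ho : out = [] <;>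
        by_cases hw : t.head? = some ' ' ∧ pvW t ≠ [] <;>
        simp [hp, ho, hw, hc]

theorem pv_inner (sub : List Char) :
    pvScan sub [] false
      = PySem.Chars.join [' ']
          ((PySem.Chars.splitOn (PySem.Chars.replace sub ['\n'] []) [' ']).filter
            (fun item => item ≠ [])) := by
  rw [pv_replace, pv_split, pvScan_eq_scan2, pv_scan2_spec]
  simp [pvW]

-- ===== VERDICT (by name: the statement is the Claim_ definition above) =====
theorem align_str_in_bracket_spec : Claim_equal_align_str_in_bracket := by
  intro content _
  unfold Spec_align_str_in_bracket align_str_in_bracket align_str_in_bracket_alt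
  by_cases h : PySem.Chars.startswith content.toList ['('] <;> simp [h, pv_inner]
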